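-- pv_equiv track=rewrite | github.com/kingjulio8238/Oceans7 | src/judge_model.py | _check_financial_openness
-- ===== SOURCE A (Python) =====
-- def _check_financial_openness(response: str) -> bool:
--     financial_phrases = [
--         'revenue',
--         'financial',
--         'earnings',
--         'quarter',
--         'results'
--     ]
--     return any(phrase in response.lower() for phrase in financial_phrases)
-- ===== SOURCE B (Python) =====
-- _PATTERNS = ['revenue', 'financial', 'earnings', 'quarter', 'results']
--
-- def _check_financial_openness(response: str) -> bool:
--     # Single left-to-right pass maintaining the set of in-progress partial
--     # matches (remaining suffixes of the keywords); no substring search.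
--     active = []
--     for ch in response:
--         c = ch.lower()
--         nxt = []
--         for rem in active + _PATTERNS:
--             if rem[0] == c:
--                 if len(rem) == 1:
--                     return True
--                 nxt.append(rem[1:])
--         active = nxt
--     return False
-- ===== Notes on version B (the rewrite author's own statement) =====
-- stated objective: alternative
-- what changed: Replaces A's five independent substring searches over the lowered string with a single left-to-right scan that maintains an explicit set of in-progress partial matches (remaining keyword suffixes), lowering each character on the fly.
import Mathlib
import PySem

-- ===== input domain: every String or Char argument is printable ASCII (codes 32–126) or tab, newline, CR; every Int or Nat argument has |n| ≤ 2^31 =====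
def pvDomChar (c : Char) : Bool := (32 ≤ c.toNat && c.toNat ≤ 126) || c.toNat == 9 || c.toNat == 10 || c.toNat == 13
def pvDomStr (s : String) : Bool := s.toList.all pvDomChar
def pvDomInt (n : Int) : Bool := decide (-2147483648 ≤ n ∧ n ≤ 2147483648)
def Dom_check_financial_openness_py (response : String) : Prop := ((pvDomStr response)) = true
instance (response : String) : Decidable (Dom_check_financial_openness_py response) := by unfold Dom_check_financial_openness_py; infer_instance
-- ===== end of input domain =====

-- B replaces A's five independent substring searches with one left-to-right scan that
-- maintains the set of in-progress partial matches (an explicit NFA simulation); alternative, same result.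


-- ===== PORT A =====
-- the literal list of phrases from A
def pvPhrases : List String := ["revenue", "financial", "earnings", "quarter", "results"]

-- any(phrase in response.lower() for phrase in financial_phrases)
def check_financial_openness_py (response : String) : Bool :=
  pvPhrases.any (fun phrase => PySem.Str.isIn phrase (PySem.Str.lower response))

-- ===== PORT B =====
-- the keyword list of Source B, as char lists
def pvPatterns : List (List Char) :=
  ["revenue".toList, "financial".toList, "earnings".toList, "quarter".toList, "results".toList]

-- Source B's inner loop: advance every active/seeded partial match by character c;
-- 'none' models the early 'return True' (a keyword just completed)
def pvAdvance (c : Char) : List (List Char) → Option (List (List Char))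
  | [] => some []
  | [] :: rest => pvAdvance c rest
  | (d :: ds) :: rest =>
      if d = c then
        if ds.isEmpty then none
        else (pvAdvance c rest).map (fun nxt => ds :: nxt)
      else pvAdvance c rest

-- Source B's outer loop over the characters, carrying the active partial matches
def pvLoop : List Char → List (List Char) → Bool
  | [], _ => false
  | ch :: cs, active =>
      match pvAdvance (PySem.Chars.lowerChar ch) (active ++ pvPatterns) with
      | none => true
      | some nxt => pvLoop cs nxt

def check_financial_openness_py_alt (response : String) : Bool :=
  pvLoop response.toList []

-- ===== PRECONDITION & SPEC =====
def Spec_check_financial_openness_py (response : String) (out : Bool) : Prop := out = check_financial_openness_py_alt response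
instance (response : String) (out : Bool) : Decidable (Spec_check_financial_openness_py response out) := by unfold Spec_check_financial_openness_py; infer_instance

-- ===== CLAIM (what is proved, stated in full; the proofs are below) =====
def Claim_equal_check_financial_openness_py : Prop := ∀ (response : String), Dom_check_financial_openness_py response → Spec_check_financial_openness_py response (check_financial_openness_py response)

-- ===== LEMMAS AND PROOFS =====

theorem pvPatterns_len : ∀ p ∈ pvPatterns, 2 ≤ p.length := by decide

-- the inner loop returns 'none' (early True) iff some singleton [c] is among the states
theorem pvAdvance_eq_none (c : Char) (l : List (List Char)) :
    pvAdvance c l = none ↔ [c] ∈ l := by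
  induction l with
  | nil => simp [pvAdvance]
  | cons rem rest ih =>
    cases rem with
    | nil => simp [pvAdvance, ih]
    | cons d ds =>
      by_cases hd : d = c
      · subst hd
        cases ds with
        | nil => simp [pvAdvance]
        | cons e es => simp [pvAdvance, ih]
      · simp [pvAdvance, hd, ih]
        rintro rfl
        simp at hd

theorem pvAdvance_eq_some (c : Char) (l : List (List Char)) (nxt : List (List Char))
    (h : pvAdvance c l = some nxt) (rem' : List Char) :
    rem' ∈ nxt ↔ rem' ≠ [] ∧ c :: rem' ∈ l := by
  induction l generalizing nxt with
  | nil =>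
    simp [pvAdvance] at h
    subst h; simp
  | cons rem rest ih =>
    cases rem with
    | nil =>
      simp only [pvAdvance] at h
      rw [ih nxt h]
      simp
    | cons d ds =>
      by_cases hd : d = c
      · subst hd
        cases ds with
        | nil => simp [pvAdvance] at h
        | cons e es =>
          simp [pvAdvance, Option.map_eq_some_iff] at h
          obtain ⟨nxt0, h0, rfl⟩ := h
          rw [List.mem_cons, ih nxt0 h0]
          constructor
          · rintro (rfl | ⟨hne, hm⟩)
            · exact ⟨by simp, by simp⟩
            · exact ⟨hne, by simp [hm]⟩
          · rintro ⟨hne, hm⟩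
            rcases List.mem_cons.mp hm with heq | hm'
            · exact Or.inl (by simpa using heq)
            · exact Or.inr ⟨hne, hm'⟩
      · simp only [pvAdvance, if_neg hd] at h
        rw [ih nxt h]
        constructor
        · rintro ⟨hne, hm⟩; exact ⟨hne, List.mem_cons_of_mem _ hm⟩
        · rintro ⟨hne, hm⟩
          rcases List.mem_cons.mp hm with heq | hm'
          · exact absurd (by injection heq with h1 _; exact h1.symm) hd
          · exact ⟨hne, hm'⟩

-- invariant of the scan: it succeeds iff an active state is a prefix of the rest of the
-- lowered text, or some keyword occurs inside it
theorem pvLoop_iff (cs : List Char) : ∀ active : List (List Char),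
    pvLoop cs active = true ↔
      (∃ rem ∈ active, rem ≠ [] ∧ rem <+: PySem.Chars.lower cs) ∨
      (∃ p ∈ pvPatterns, p <:+: PySem.Chars.lower cs) := by
  induction cs with
  | nil =>
    intro active
    simp only [pvLoop, PySem.Chars.lower, List.map_nil]
    constructor
    · intro h; cases h
    · rintro (⟨rem, _, hne, hpre⟩ | ⟨p, hp, hinf⟩)
      · exact absurd (List.prefix_nil.mp hpre) hne
      · have h2 := pvPatterns_len p hp
        rw [List.infix_nil.mp hinf] at h2
        simp at h2
  | cons ch cs ih =>
    intro active
    have hlow : PySem.Chars.lower (ch :: cs)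
        = PySem.Chars.lowerChar ch :: PySem.Chars.lower cs := by
      simp [PySem.Chars.lower]
    set c := PySem.Chars.lowerChar ch with hc
    rw [hlow]
    cases hadv : pvAdvance c (active ++ pvPatterns) with
    | none =>
      simp only [pvLoop]
      rw [← hc, hadv]
      constructor
      · intro _
        rcases List.mem_append.mp ((pvAdvance_eq_none c _).mp hadv) with hm | hm
        · exact Or.inl ⟨[c], hm, by simp, by simp⟩
        · exact Or.inr ⟨[c], hm, ((List.prefix_cons_inj c).mpr (List.nil_prefix)).isInfix⟩
      · intro _; rfl
    | some nxt =>
      simp only [pvLoop]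
      rw [← hc, hadv, ih nxt]
      have hmem := pvAdvance_eq_some c _ nxt hadv
      have hnone : [c] ∉ active ++ pvPatterns := by
        intro hm
        rw [(pvAdvance_eq_none c _).mpr hm] at hadv
        cases hadv
      constructor
      · rintro (⟨rem', hr, hne, hpre⟩ | ⟨p, hp, hinf⟩)
        · rcases List.mem_append.mp ((hmem rem').mp hr).2 with hm | hm
          · exact Or.inl ⟨c :: rem', hm, by simp, (List.cons_prefix_cons).mpr ⟨rfl, hpre⟩⟩
          · exact Or.inr ⟨c :: rem', hm, ((List.cons_prefix_cons).mpr ⟨rfl, hpre⟩).isInfix⟩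
        · exact Or.inr ⟨p, hp, hinf.trans (List.suffix_cons c _).isInfix⟩
      · rintro (⟨rem, hr, hne, hpre⟩ | ⟨p, hp, hinf⟩)
        · cases rem with
          | nil => exact absurd rfl hne
          | cons d rem'' =>
            obtain ⟨rfl, hpre'⟩ := List.cons_prefix_cons.mp hpre
            have hne'' : rem'' ≠ [] := by
              rintro rfl
              exact hnone (List.mem_append.mpr (Or.inl hr))
            exact Or.inl ⟨rem'', (hmem rem'').mpr ⟨hne'', List.mem_append.mpr (Or.inl hr)⟩,
              hne'', hpre'⟩
        · rcases List.infix_cons_iff.mp hinf with hpre | hinf'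
          · cases p with
            | nil =>
              have h2 := pvPatterns_len [] hp
              simp at h2
            | cons d p'' =>
              obtain ⟨rfl, hpre'⟩ := List.cons_prefix_cons.mp hpre
              have hne'' : p'' ≠ [] := by
                rintro rfl
                have := pvPatterns_len [c] hp; simp at this
              exact Or.inl ⟨p'', (hmem p'').mpr ⟨hne'', List.mem_append.mpr (Or.inr hp)⟩,
                hne'', hpre'⟩
          · exact Or.inr ⟨p, hp, hinf'⟩

-- A's result, characterised as "some phrase is an infix of the lowered text"
theorem pvA_iff (response : String) :
    check_financial_openness_py response = true ↔
      ∃ p ∈ pvPatterns, p <:+: PySem.Chars.lower response.toList := by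
  simp only [check_financial_openness_py, List.any_eq_true]
  constructor
  · rintro ⟨q, hq, h⟩
    rw [PySem.Str.isIn_iff_infix, PySem.Str.toList_lower] at h
    refine ⟨q.toList, ?_, h⟩
    fin_cases hq <;> simp [pvPatterns]
  · rintro ⟨p, hp, h⟩
    have : ∃ q ∈ pvPhrases, q.toList = p := by
      fin_cases hp <;> exact ⟨_, by simp [pvPhrases], rfl⟩
    obtain ⟨q, hq, rfl⟩ := this
    refine ⟨q, hq, ?_⟩
    rw [PySem.Str.isIn_iff_infix, PySem.Str.toList_lower]
    exact h

-- ===== VERDICT (by name: the statement is the Claim_ definition above) =====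
theorem check_financial_openness_py_spec : Claim_equal_check_financial_openness_py := by
  intro response _
  unfold Spec_check_financial_openness_py check_financial_openness_py_alt
  rw [Bool.eq_iff_iff, pvA_iff, pvLoop_iff]
  simp
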